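-- pv_equiv track=rewrite | github.com/martinlackner/shortlisting | shortlisting.py | compute_largestgap
-- ===== SOURCE A (Python) =====
-- def compute_largestgap(scores):
--     """Returns the list of winning committees
--     according to the Largest Gap rule"""
--     scores_sorted = sorted(scores, reverse=True)
--     gaps = [scores_sorted[i] - scores_sorted[i + 1] for i in range(len(scores) - 1)]
--     gapvalue = max(
--         [scores_sorted[i] for i in range(len(scores) - 1) if gaps[i] == max(gaps)]
--     )
--     committee = [c for c in range(len(scores)) if scores[c] >= gapvalue]
--
--     return committee
-- ===== SOURCE B (Python) =====
-- def compute_largestgap(scores):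
--     """Returns the list of winning committees
--     according to the Largest Gap rule"""
--     scores_sorted = sorted(scores, reverse=True)
--     best_gap = None
--     threshold = None
--     for hi, lo in zip(scores_sorted, scores_sorted[1:]):
--         g = hi - lo
--         if best_gap is None or g > best_gap:
--             best_gap = g
--             threshold = hi
--     if threshold is None:
--         raise ValueError("need at least two scores")
--     return [c for c, s in enumerate(scores) if s >= threshold]
-- ===== Notes on version B (the rewrite author's own statement) =====
-- stated objective: faster
-- what changed: Replaces the gaps list, the per-candidate recomputation of max(gaps) and the max-over-candidates comprehension by a single pass over adjacent sorted pairs that tracks the running maximal gap and its upper value (strictly-greater update keeps the first, i.e. highest, maximal gap).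
-- outside the precondition, e.g. on compute_largestgap([]): A raises ValueError, B raises ValueError; on compute_largestgap([3]): A raises ValueError, B raises ValueError
import Mathlib
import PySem

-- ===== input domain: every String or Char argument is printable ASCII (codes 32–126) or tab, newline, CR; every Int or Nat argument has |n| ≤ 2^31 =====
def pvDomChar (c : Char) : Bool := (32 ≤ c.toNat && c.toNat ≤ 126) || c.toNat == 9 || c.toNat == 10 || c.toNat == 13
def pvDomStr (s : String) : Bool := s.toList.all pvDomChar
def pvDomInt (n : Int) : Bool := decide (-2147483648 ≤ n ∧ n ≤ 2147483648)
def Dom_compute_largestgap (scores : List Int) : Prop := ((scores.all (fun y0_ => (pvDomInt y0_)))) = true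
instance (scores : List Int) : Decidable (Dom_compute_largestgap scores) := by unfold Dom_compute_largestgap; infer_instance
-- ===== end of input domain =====

-- B replaces A's gaps list, the max(gaps) recomputed per candidate and the max-over-candidates
-- comprehension by one pass over adjacent sorted pairs tracking the largest gap and its upper value.

-- ===== PORT A =====
def compute_largestgap (scores : List Int) : List Int :=
  let scores_sorted := PySem.List.sorted scores (fun x => x) true
  let gaps := (PySem.List.pyRange 0 ((scores.length : Int) - 1) 1).map
    (fun i => PySem.List.pyGetD scores_sorted i 0 - PySem.List.pyGetD scores_sorted (i + 1) 0)
  let gapvalue := (PySem.List.max?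
    ((PySem.List.pyRange 0 ((scores.length : Int) - 1) 1).filterMap
      (fun i => if PySem.List.pyGetD gaps i 0 = (PySem.List.max? gaps (fun x => x)).getD 0
                then some (PySem.List.pyGetD scores_sorted i 0) else none))
    (fun x => x)).getD 0
  (PySem.List.pyRange 0 (scores.length : Int) 1).filter
    (fun c => decide (gapvalue ≤ PySem.List.pyGetD scores c 0))

-- ===== PORT B =====
-- loop body: strictly-greater update of (best_gap, threshold)
def lgStep (st : Option Int × Option Int) (p : Int × Int) : Option Int × Option Int :=
  let g := p.1 - p.2
  match st.1 with
  | none => (some g, some p.1)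
  | some b => if b < g then (some g, some p.1) else st

def compute_largestgap_alt (scores : List Int) : List Int :=
  let ss := PySem.List.sorted scores (fun x => x) true
  let st := (ss.zip ss.tail).foldl lgStep (none, none)
  match st.2 with
  | none => []  -- Python raises ValueError here (outside Pre_)
  | some t => (PySem.List.enumerate scores).filterMap
      (fun cs => if t ≤ cs.2 then some cs.1 else none)

-- ===== PRECONDITION & SPEC =====
-- A evaluates max([]) (ValueError) when fewer than two scores are given; B raises ValueError there too.
def Pre_compute_largestgap (scores : List Int) : Prop := 2 ≤ scores.length
instance (scores : List Int) : Decidable (Pre_compute_largestgap scores) := by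
  unfold Pre_compute_largestgap; infer_instance
def pvWitness_compute_largestgap : List Int := [1, 5, 3]

def Spec_compute_largestgap (scores : List Int) (out : List Int) : Prop := out = compute_largestgap_alt scores
instance (scores : List Int) (out : List Int) : Decidable (Spec_compute_largestgap scores out) := by unfold Spec_compute_largestgap; infer_instance

-- ===== CLAIM (what is proved, stated in full; the proofs are below) =====
def Claim_equal_compute_largestgap : Prop := ∀ (scores : List Int), Dom_compute_largestgap scores → Pre_compute_largestgap scores → Spec_compute_largestgap scores (compute_largestgap scores)

-- ===== LEMMAS AND PROOFS =====

-- gap of an adjacent pair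
def pvGap (p : Int × Int) : Int := p.1 - p.2
-- running maximum of gaps
def pvM (l : List (Int × Int)) (b : Int) : Int := l.foldl (fun a p => max a (pvGap p)) b

theorem pvM_eq_foldl_map (l : List (Int × Int)) (b : Int) :
    pvM l b = (l.map pvGap).foldl max b := by
  simp [pvM, List.foldl_map]

theorem pv_le_M (l : List (Int × Int)) (b : Int) : b ≤ pvM l b := by
  rw [pvM_eq_foldl_map]; exact (PySem.List.le_foldl_max _ _).1

theorem pv_M_attained (l : List (Int × Int)) (b : Int) :
    pvM l b = b ∨ ∃ p ∈ l, pvGap p = pvM l b := by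
  rw [pvM_eq_foldl_map]
  rcases PySem.List.foldl_max_mem (l.map pvGap) b with h | h
  · exact Or.inl h
  · right
    obtain ⟨p, hp, hpe⟩ := List.mem_map.mp h
    exact ⟨p, hp, hpe⟩

-- a filter is the filterMap keeping the matching elements
theorem pv_filter_eq_filterMap {α : Type} (l : List α) (p : α → Bool) :
    l.filter p = l.filterMap (fun x => if p x then some x else none) := by
  induction l with
  | nil => rfl
  | cons x t ih => by_cases h : p x <;> simp [List.filter, List.filterMap, h, ih]

-- comprehension over range(len(l)) = comprehension over l
theorem pv_range_filterMap {α β : Type} (l : List α) (f : Int → Option β) (g : α → Option β)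
    (h : ∀ (k : Nat) (hk : k < l.length), f (k : Int) = g l[k]) :
    (PySem.List.pyRange 0 (l.length : Int) 1).filterMap f = l.filterMap g := by
  induction l using List.reverseRecOn with
  | nil => simp [PySem.List.pyRange_one_eq_nil]
  | append_singleton t x ih =>
    have hlen : ((t ++ [x]).length : Int) = (t.length : Int) + 1 := by simp
    rw [hlen, PySem.List.pyRange_one_succ_right (by positivity), List.filterMap_append,
      List.filterMap_append]
    congr 1
    · exact ih (fun k hk => by
        have := h k (by simp; omega)
        rwa [List.getElem_append_left hk] at this)
    · have hx := h t.length (by simp)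
      simp only [List.getElem_concat_length] at hx
      simp [List.filterMap, hx]

-- comprehension over range(len(l)) = map over l
theorem pv_range_map {α β : Type} (l : List α) (f : Int → β) (g : α → β)
    (h : ∀ (k : Nat) (hk : k < l.length), f (k : Int) = g l[k]) :
    (PySem.List.pyRange 0 (l.length : Int) 1).map f = l.map g := by
  induction l using List.reverseRecOn with
  | nil => simp [PySem.List.pyRange_one_eq_nil]
  | append_singleton t x ih =>
    have hlen : ((t ++ [x]).length : Int) = (t.length : Int) + 1 := by simp
    rw [hlen, PySem.List.pyRange_one_succ_right (by positivity), List.map_append,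
      List.map_append]
    congr 1
    · exact ih (fun k hk => by
        have := h k (by simp; omega)
        rwa [List.getElem_append_left hk] at this)
    · have hx := h t.length (by simp)
      simp only [List.getElem_concat_length] at hx
      simp [hx]

theorem pv_filterMap_if_eq_map_filter {α β : Type} (l : List α) (q : α → Prop) [DecidablePred q] (f : α → β) :
    l.filterMap (fun x => if q x then some (f x) else none) = (l.filter (fun x => decide (q x))).map f := by
  induction l with
  | nil => rfl
  | cons x t ih => by_cases h : q x <;> simp [h, ih]

theorem pv_find?_eq_head?_filter {α : Type} (l : List α) (q : α → Bool) :
    l.find? q = (l.filter q).head? := by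
  induction l with
  | nil => rfl
  | cons x t ih =>
    rw [List.find?_cons, List.filter_cons]
    by_cases h : q x
    · simp [h]
    · simp only [h]
      simp only [Bool.false_eq_true, if_false]
      exact ih

-- head of a nonincreasing list is its Python max
theorem pv_max?_head (x : Int) (t : List Int)
    (h : ∀ y ∈ t, y ≤ x) :
    PySem.List.max? (x :: t) (fun y => y) = some x := by
  rw [PySem.List.max?_id_cons]
  rcases PySem.List.foldl_max_mem t x with h1 | h1
  · rw [h1]
  · have h2 := h _ h1
    have h3 := (PySem.List.le_foldl_max t x).1
    congr 1
    omega

-- first components of zip-with-tail form a sublist of the list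
theorem pv_map_fst_zip_sublist {α β : Type} (l1 : List α) (l2 : List β) :
    ((l1.zip l2).map (fun p => p.1)).Sublist l1 := by
  induction l1 generalizing l2 with
  | nil => simp
  | cons x t ih =>
    cases l2 with
    | nil => simp
    | cons y s => simpa using List.Sublist.cons₂ x (ih s)

-- the foldl of B's loop, characterised
theorem pv_foldl_char (qs : List (Int × Int)) (b t : Int) :
    qs.foldl lgStep (some b, some t) =
      (some (pvM qs b),
       some (if b < pvM qs b
             then (((qs.find? (fun p => decide (pvGap p = pvM qs b))).map (·.1)).getD t)
             else t)) := by
  induction qs generalizing b t with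
  | nil => simp [pvM]
  | cons p rs ih =>
    have hstep : lgStep (some b, some t) p =
        if b < pvGap p then (some (pvGap p), some p.1) else (some b, some t) := by
      simp [lgStep, pvGap]
    have hM : pvM (p :: rs) b = pvM rs (max b (pvGap p)) := by simp [pvM]
    rw [List.foldl_cons, hstep]
    by_cases hbp : b < pvGap p
    · rw [if_pos hbp, ih (pvGap p) p.1]
      have hmax : max b (pvGap p) = pvGap p := by omega
      rw [hM, hmax]
      have hgle : pvGap p ≤ pvM rs (pvGap p) := pv_le_M rs (pvGap p)
      have hbM : b < pvM rs (pvGap p) := lt_of_lt_of_le hbp hgle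
      rw [if_pos hbM]
      by_cases hpm : pvGap p = pvM rs (pvGap p)
      · rw [List.find?_cons_of_pos (by simpa using hpm), if_neg (by omega)]
        simp
      · have hlt : pvGap p < pvM rs (pvGap p) := lt_of_le_of_ne hgle hpm
        rw [List.find?_cons_of_neg (by simp [hpm]), if_pos hlt]
        rcases pv_M_attained rs (pvGap p) with hc | hc
        · omega
        · obtain ⟨r, hr, hre⟩ := hc
          cases hr' : rs.find? (fun x => decide (pvGap x = pvM rs (pvGap p))) with
          | none => exact absurd hre (by simpa using List.find?_eq_none.mp hr' r hr)
          | some r2 => simp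
    · rw [if_neg hbp, ih b t]
      have hmax : max b (pvGap p) = b := by omega
      rw [hM, hmax]
      by_cases hbM : b < pvM rs b
      · rw [if_pos hbM, if_pos hbM, List.find?_cons_of_neg (by simp; omega)]
      · rw [if_neg hbM, if_neg hbM]

-- the two threshold computations agree on a nonincreasing list with at least two elements
theorem pv_thr (ss : List Int) (h2 : 2 ≤ ss.length)
    (hsorted : ss.Pairwise (fun a b => b ≤ a)) :
    ((ss.zip ss.tail).foldl lgStep (none, none)).2 =
    some ((PySem.List.max? ((ss.zip ss.tail).filterMap
        (fun p => if pvGap p = (PySem.List.max? ((ss.zip ss.tail).map pvGap) (fun x => x)).getD 0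
                  then some p.1 else none)) (fun x => x)).getD 0) := by
  have hpslen : (ss.zip ss.tail).length = ss.length - 1 := by
    rw [List.length_zip, List.length_tail]; omega
  cases hpp : ss.zip ss.tail with
  | nil => rw [hpp] at hpslen; simp at hpslen; omega
  | cons q qs =>
    have hmax : PySem.List.max? ((q :: qs).map pvGap) (fun x => x)
        = some (pvM qs (pvGap q)) := by
      rw [List.map_cons, PySem.List.max?_id_cons]
      simp [pvM_eq_foldl_map]
    set Mv := pvM qs (pvGap q) with hMv
    have hmax' : (PySem.List.max? ((q :: qs).map pvGap) (fun x => x)).getD 0 = Mv := by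
      rw [hmax]; rfl
    rw [hmax']
    -- A side: candidates, find?, head
    have hattain : ∃ p ∈ q :: qs, pvGap p = Mv := by
      rcases pv_M_attained qs (pvGap q) with hc | hc
      · exact ⟨q, List.mem_cons_self, by omega⟩
      · obtain ⟨p, hp, hpe⟩ := hc
        exact ⟨p, List.mem_cons_of_mem _ hp, hpe⟩
    have hfilter := pv_find?_eq_head?_filter (q :: qs) (fun p => decide (pvGap p = Mv))
    cases hfl : (q :: qs).filter (fun p => decide (pvGap p = Mv)) with
    | nil =>
      obtain ⟨p, hp, hpe⟩ := hattain
      have hmem : p ∈ (q :: qs).filter (fun p => decide (pvGap p = Mv)) :=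
        List.mem_filter.mpr ⟨hp, by simp [hpe]⟩
      rw [hfl] at hmem
      simp at hmem
    | cons r rest =>
      rw [hfl] at hfilter
      simp only [List.head?_cons] at hfilter
      have hr := hfilter
      have hcand : (q :: qs).filterMap
          (fun p => if pvGap p = Mv then some p.1 else none)
          = r.1 :: rest.map (fun p => p.1) := by
        rw [pv_filterMap_if_eq_map_filter, hfl, List.map_cons]
      rw [hcand]
      -- sortedness: the candidate heads are nonincreasing
      have hsub : ((r :: rest).map (fun p => p.1)).Sublist ss := by
        rw [← hfl, ← hpp]
        exact (List.Sublist.map _ List.filter_sublist).trans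
          (pv_map_fst_zip_sublist ss ss.tail)
      have hpair : ((r :: rest).map (fun p => p.1)).Pairwise (fun a b => b ≤ a) :=
        hsorted.sublist hsub
      rw [List.map_cons] at hpair
      rw [pv_max?_head _ _ (fun y hy => List.rel_of_pairwise_cons hpair hy)]
      -- B side
      have hq : lgStep (none, none) q = (some (pvGap q), some q.1) := by
        simp [lgStep, pvGap]
      rw [List.foldl_cons, hq, pv_foldl_char qs (pvGap q) q.1, ← hMv]
      simp only [Option.getD_some]
      congr 1
      -- equate thresholds
      by_cases hqm : pvGap q = Mv
      · have hfq : (q :: qs).find? (fun p => decide (pvGap p = Mv)) = some q := by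
          rw [List.find?_cons_of_pos (by simp [hqm])]
        have hrq : r = q := by rw [hfq] at hr; exact (Option.some_inj.mp hr).symm
        rw [if_neg (by omega), hrq]
      · have hle : pvGap q ≤ Mv := hMv ▸ pv_le_M qs (pvGap q)
        have hlt : pvGap q < Mv := lt_of_le_of_ne hle hqm
        have hfq : (q :: qs).find? (fun p => decide (pvGap p = Mv))
            = qs.find? (fun p => decide (pvGap p = Mv)) := by
          rw [List.find?_cons_of_neg (by simp [hqm])]
        rw [if_pos hlt, ← hfq, hr]
        simp

-- committee construction: index filter over range = enumerate filterMap
theorem pv_committee (xs : List Int) (t : Int) :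
    (PySem.List.pyRange 0 (xs.length : Int) 1).filter
      (fun c => decide (t ≤ PySem.List.pyGetD xs c 0))
    = (PySem.List.enumerate xs).filterMap (fun cs => if t ≤ cs.2 then some cs.1 else none) := by
  rw [pv_filter_eq_filterMap]
  have hlen : (xs.length : Int) = ((PySem.List.enumerate xs).length : Int) := by
    simp [PySem.List.length_enumerate]
  rw [hlen]
  refine pv_range_filterMap _ _ _ (fun k hk => ?_)
  have hk' : k < xs.length := by simpa [PySem.List.length_enumerate] using hk
  rw [PySem.List.getElem_enumerate]
  simp [PySem.List.pyGetD_natCast, List.getD_eq_getElem?_getD, hk']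

-- ===== VERDICT (by name: the statement is the Claim_ definition above) =====
theorem compute_largestgap_spec : Claim_equal_compute_largestgap := by
  intro scores _hdom hpre
  have hpre' : 2 ≤ scores.length := hpre
  unfold Spec_compute_largestgap
  simp only [compute_largestgap, compute_largestgap_alt]
  set ss := PySem.List.sorted scores (fun x => x) true with hss
  have hm : ss.length = scores.length := by rw [hss]; exact PySem.List.length_sorted _ _ _
  have h2 : 2 ≤ ss.length := by omega
  have hsorted : ss.Pairwise (fun a b => b ≤ a) := by
    simpa using PySem.List.sorted_pairwise_rev (xs := scores) (key := fun x => x)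
  have hbound : ((scores.length : Int) - 1) = (((ss.zip ss.tail).length : Nat) : Int) := by
    simp only [List.length_zip, List.length_tail, hm]
    omega
  have hgaps : (PySem.List.pyRange 0 ((scores.length : Int) - 1) 1).map
      (fun i => PySem.List.pyGetD ss i 0 - PySem.List.pyGetD ss (i + 1) 0)
      = (ss.zip ss.tail).map pvGap := by
    rw [hbound]
    refine pv_range_map _ _ _ (fun k hk => ?_)
    have hk1 : k < ss.length := by
      rw [List.length_zip, List.length_tail] at hk; omega
    have hk2 : k + 1 < ss.length := by
      rw [List.length_zip, List.length_tail] at hk; omega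
    have hcast : ((k : Int) + 1) = ((k + 1 : Nat) : Int) := by push_cast; ring
    rw [hcast, PySem.List.pyGetD_natCast, PySem.List.pyGetD_natCast,
      List.getD_eq_getElem _ _ hk1, List.getD_eq_getElem _ _ hk2, List.getElem_zip]
    simp [pvGap, List.getElem_tail]
  rw [hgaps]
  have hcand : (PySem.List.pyRange 0 ((scores.length : Int) - 1) 1).filterMap
      (fun i => if PySem.List.pyGetD ((ss.zip ss.tail).map pvGap) i 0
          = (PySem.List.max? ((ss.zip ss.tail).map pvGap) (fun x => x)).getD 0
        then some (PySem.List.pyGetD ss i 0) else none)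
      = (ss.zip ss.tail).filterMap
        (fun p => if pvGap p
            = (PySem.List.max? ((ss.zip ss.tail).map pvGap) (fun x => x)).getD 0
          then some p.1 else none) := by
    rw [hbound]
    refine pv_range_filterMap _ _ _ (fun k hk => ?_)
    have hk1 : k < ss.length := by
      rw [List.length_zip, List.length_tail] at hk; omega
    have hkm : k < ((ss.zip ss.tail).map pvGap).length := by
      rw [List.length_map]; exact hk
    rw [PySem.List.pyGetD_natCast, PySem.List.pyGetD_natCast,
      List.getD_eq_getElem _ _ hkm, List.getD_eq_getElem _ _ hk1,
      List.getElem_map, List.getElem_zip]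
    try rfl
  rw [hcand]
  rw [pv_thr ss h2 hsorted]
  rw [pv_committee]
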